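-- pv_equiv track=rewrite | github.com/baiwan-chenhao/rewrite | leetcode_gen_week2.py | solve
-- ===== SOURCE A (Python) =====
-- def solve(s: str, K: int) -> int:
--     s = list(map(ord, s))  # 避免频繁计算 ord
--     n = len(s)
--     cnt = 0
--     for i in range(n // 2):
--         d = abs(s[i] - s[-1 - i])
--         cnt += min(d, 26 - d)
--     if cnt <= K:
--         return n
--
--     f = [[[0] * n for _ in range(n)] for _ in range(K + 1)]
--     for k in range(K + 1):
--         for i in range(n - 1, -1, -1):
--             f[k][i][i] = 1
--             for j in range(i + 1, n):
--                 res = max(f[k][i + 1][j], f[k][i][j - 1])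
--                 d = abs(s[i] - s[j])
--                 op = min(d, 26 - d)
--                 if op <= k:
--                     res = max(res, f[k - op][i + 1][j - 1] + 2)
--                 f[k][i][j] = res
--     return f[K][0][-1]
-- ===== SOURCE B (Python) =====
-- def solve(s: str, K: int) -> int:
--     vals = [ord(c) for c in s]
--     n = len(vals)
--     cnt = 0
--     for i in range(n // 2):
--         d = abs(vals[i] - vals[-1 - i])
--         cnt += min(d, 26 - d)
--     if cnt <= K:
--         return n
--
--     memo = {}
--     def rec(k, i, j):
--         if i > j:
--             return 0
--         if i == j:
--             return 1
--         key = (k, i, j)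
--         if key in memo:
--             return memo[key]
--         res = max(rec(k, i + 1, j), rec(k, i, j - 1))
--         d = abs(vals[i] - vals[j])
--         op = min(d, 26 - d)
--         if op <= k:
--             res = max(res, rec(k - op, i + 1, j - 1) + 2)
--         memo[key] = res
--         return res
--     return rec(K, 0, n - 1)
-- ===== Notes on version B (the rewrite author's own statement) =====
-- stated objective: alternative
-- what changed: The triple nested bottom-up loops filling a (K+1)*n*n table are replaced by a memoized recursive helper rec(k,i,j) (dict keyed on (k,i,j)) that computes only the states reachable from (K,0,n-1); the ord precomputation and the cnt<=K early exit stay.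
import Mathlib
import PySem

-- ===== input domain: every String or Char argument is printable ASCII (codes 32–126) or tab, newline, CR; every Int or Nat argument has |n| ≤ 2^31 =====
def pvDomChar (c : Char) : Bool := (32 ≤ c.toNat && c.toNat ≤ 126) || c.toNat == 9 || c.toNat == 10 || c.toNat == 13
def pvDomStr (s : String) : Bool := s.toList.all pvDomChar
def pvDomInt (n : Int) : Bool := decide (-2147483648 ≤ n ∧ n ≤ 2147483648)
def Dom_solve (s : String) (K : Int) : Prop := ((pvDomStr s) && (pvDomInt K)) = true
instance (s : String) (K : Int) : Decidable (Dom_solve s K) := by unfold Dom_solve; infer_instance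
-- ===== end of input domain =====

-- B replaces A's triple nested bottom-up DP loops by a memoized recursive helper keyed on (k,i,j) (alternative decomposition, same results).


-- ===== PORT A =====
-- f[k][i][j] read with a default (indices are always in range on Pre_-admitted inputs)
def aGet3 (f : List (List (List Int))) (k i j : Int) : Int :=
  PySem.List.pyGetD (PySem.List.pyGetD (PySem.List.pyGetD f k []) i []) j 0

-- f[k][i][j] = v (in-place assignment on nested Python lists)
def aSet3 (f : List (List (List Int))) (k i j : Int) (v : Int) : List (List (List Int)) :=
  let layer := PySem.List.pyGetD f k []
  let row := PySem.List.pyGetD layer i []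
  PySem.List.pySetD f k (PySem.List.pySetD layer i (PySem.List.pySetD row j v))

def solve (s : String) (K : Int) : Int :=
  let sv : List Int := s.toList.map (fun c => (c.toNat : Int))
  let n : Int := PySem.List.len sv
  let cnt : Int := (PySem.List.pyRange 0 (PySem.Int.floordiv n 2) 1).foldl
      (fun cnt i =>
        let d := |PySem.List.pyGetD sv i 0 - PySem.List.pyGetD sv (-1 - i) 0|
        cnt + min d (26 - d)) 0
  if cnt ≤ K then n
  else
    let f0 : List (List (List Int)) :=
      (PySem.List.pyRange 0 (K + 1) 1).map (fun _ =>
        (PySem.List.pyRange 0 n 1).map (fun _ => PySem.List.pyRepeat [(0 : Int)] n))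
    let f := (PySem.List.pyRange 0 (K + 1) 1).foldl (fun f k =>
      (PySem.List.pyRange (n - 1) (-1) (-1)).foldl (fun f i =>
        let f := aSet3 f k i i 1
        (PySem.List.pyRange (i + 1) n 1).foldl (fun f j =>
          let res := max (aGet3 f k (i + 1) j) (aGet3 f k i (j - 1))
          let d := |PySem.List.pyGetD sv i 0 - PySem.List.pyGetD sv j 0|
          let op := min d (26 - d)
          let res := if op ≤ k then max res (aGet3 f (k - op) (i + 1) (j - 1) + 2) else res
          aSet3 f k i j res) f) f) f0
    PySem.List.pyGetD (PySem.List.pyGetD (PySem.List.pyGetD f K []) 0 []) (-1) 0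

-- ===== PORT B =====
-- memoized rec(k,i,j) from Source B; gas is a totalization fuel only (gas ≥ j-i on every real call)
def recB (vals : List Int) (gas : Nat) (k i j : Int)
    (memo : PySem.Dict (Int × Int × Int) Int) : Int × PySem.Dict (Int × Int × Int) Int :=
  if j < i then (0, memo)
  else if i = j then (1, memo)
  else match memo.get? (k, i, j) with
  | some v => (v, memo)
  | none =>
    match gas with
    | 0 => (0, memo)  -- unreachable under the fuel invariant
    | gas + 1 =>
      let p1 := recB vals gas k (i + 1) j memo
      let p2 := recB vals gas k i (j - 1) p1.2
      let res := max p1.1 p2.1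
      let d := |PySem.List.pyGetD vals i 0 - PySem.List.pyGetD vals j 0|
      let op := min d (26 - d)
      let p3 := if op ≤ k then
          let q := recB vals gas (k - op) (i + 1) (j - 1) p2.2
          (max res (q.1 + 2), q.2)
        else (res, p2.2)
      (p3.1, p3.2.insert (k, i, j) p3.1)

def solve_alt (s : String) (K : Int) : Int :=
  let vals : List Int := s.toList.map (fun c => (c.toNat : Int))
  let n : Int := PySem.List.len vals
  let cnt : Int := (PySem.List.pyRange 0 (PySem.Int.floordiv n 2) 1).foldl
      (fun cnt i =>
        let d := |PySem.List.pyGetD vals i 0 - PySem.List.pyGetD vals (-1 - i) 0|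
        cnt + min d (26 - d)) 0
  if cnt ≤ K then n
  else (recB vals (n - 1).toNat K 0 (n - 1) PySem.Dict.empty).1

-- ===== PRECONDITION & SPEC =====
-- the early-exit quantity of both programs, as a closed sum over the mirrored pairs
def pvCnt (s : String) : Int :=
  let v : List Int := s.toList.map (fun c => (c.toNat : Int))
  (((v.take (v.length / 2)).zip v.reverse).map (fun p => min |p.1 - p.2| (26 - |p.1 - p.2|))).sum

-- Pre_ keeps exactly the inputs on which A returns: when the DP runs (cnt > K), A raises IndexError
-- if K < 0 (empty table) or if two characters are more than 26 code points apart (the circular cost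
-- goes negative and f[k-op] indexes past the last layer).
def Pre_solve (s : String) (K : Int) : Prop :=
  pvCnt s ≤ K ∨ (0 ≤ K ∧ s.toList.all (fun c => s.toList.all (fun c' =>
    decide (c.toNat ≤ c'.toNat + 26))) = true)
instance (s : String) (K : Int) : Decidable (Pre_solve s K) := by unfold Pre_solve; infer_instance

def pvWitness_solve : String × Int := ("ab", 0)

def Spec_solve (s : String) (K : Int) (out : Int) : Prop := out = solve_alt s K
instance (s : String) (K : Int) (out : Int) : Decidable (Spec_solve s K out) := by unfold Spec_solve; infer_instance

-- ===== CLAIM (what is proved, stated in full; the proofs are below) =====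
def Claim_equal_solve : Prop := ∀ (s : String) (K : Int), Dom_solve s K → Pre_solve s K → Spec_solve s K (solve s K)

-- ===== LEMMAS AND PROOFS =====

def gSpec (vals : List Int) (k i j : Int) : Int :=
  if j < i then 0
  else if i = j then 1
  else
    let res := max (gSpec vals k (i + 1) j) (gSpec vals k i (j - 1))
    let d := |PySem.List.pyGetD vals i 0 - PySem.List.pyGetD vals j 0|
    let op := min d (26 - d)
    if op ≤ k then max res (gSpec vals (k - op) (i + 1) (j - 1) + 2) else res
termination_by (j - i).toNat
decreasing_by all_goals omega

theorem gSpec_of_lt {vals : List Int} {k i j : Int} (h : j < i) : gSpec vals k i j = 0 := by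
  rw [gSpec]; simp [h]

theorem gSpec_of_eq {vals : List Int} {k i j : Int} (h : i = j) : gSpec vals k i j = 1 := by
  rw [gSpec]; simp [h]

theorem gSpec_of_gt {vals : List Int} {k i j : Int} (h : i < j) : gSpec vals k i j =
    (if min |PySem.List.pyGetD vals i 0 - PySem.List.pyGetD vals j 0|
        (26 - |PySem.List.pyGetD vals i 0 - PySem.List.pyGetD vals j 0|) ≤ k then
      max (max (gSpec vals k (i + 1) j) (gSpec vals k i (j - 1)))
        (gSpec vals (k - min |PySem.List.pyGetD vals i 0 - PySem.List.pyGetD vals j 0|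
          (26 - |PySem.List.pyGetD vals i 0 - PySem.List.pyGetD vals j 0|)) (i + 1) (j - 1) + 2)
    else max (gSpec vals k (i + 1) j) (gSpec vals k i (j - 1))) := by
  conv_lhs => rw [gSpec]
  simp only [if_neg (by omega : ¬ j < i), if_neg (by omega : ¬ i = j)]

def Shape (K : Int) (n : Nat) (f : List (List (List Int))) : Prop :=
  f.length = (K + 1).toNat ∧ ∀ l ∈ f, l.length = n ∧ ∀ r ∈ l, r.length = n

-- helper: pyGetD at a nonnegative index is List.getD at its toNat
theorem pyGetD_nonneg {α : Type} (xs : List α) {i : Int} (h : 0 ≤ i) (d : α) :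
    PySem.List.pyGetD xs i d = xs.getD i.toNat d := by
  simp [PySem.List.pyGetD, PySem.List.pyGet?_of_nonneg xs h, List.getD_eq_getElem?_getD]

theorem aGet3_toNat {f : List (List (List Int))} {k i j : Int}
    (hk : 0 ≤ k) (hi : 0 ≤ i) (hj : 0 ≤ j) :
    aGet3 f k i j = (((f.getD k.toNat []).getD i.toNat []).getD j.toNat 0) := by
  unfold aGet3
  rw [pyGetD_nonneg f hk, pyGetD_nonneg _ hi, pyGetD_nonneg _ hj]

theorem aSet3_toNat {f : List (List (List Int))} {k i j : Int} (v : Int)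
    (hk : 0 ≤ k) (hi : 0 ≤ i) (hj : 0 ≤ j) :
    aSet3 f k i j v = f.set k.toNat ((f.getD k.toNat []).set i.toNat
      (((f.getD k.toNat []).getD i.toNat []).set j.toNat v)) := by
  have h0 : aSet3 f k i j v = PySem.List.pySetD f k (PySem.List.pySetD (PySem.List.pyGetD f k []) i
      (PySem.List.pySetD (PySem.List.pyGetD (PySem.List.pyGetD f k []) i []) j v)) := rfl
  rw [h0, pyGetD_nonneg f hk, pyGetD_nonneg _ hi,
    PySem.List.pySetD_of_nonneg _ _ hj, PySem.List.pySetD_of_nonneg _ _ hi,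
    PySem.List.pySetD_of_nonneg _ _ hk]

theorem getD_set_same {α : Type} (l : List α) (k j : Nat) (x d : α) :
    (l.set k x).getD j d = if j = k ∧ k < l.length then x else l.getD j d := by
  simp only [List.getD_eq_getElem?_getD, List.getElem?_set]
  split_ifs <;> simp_all

theorem Shape_aSet3 {K : Int} {n : Nat} {f : List (List (List Int))} (hs : Shape K n f)
    {k i j : Int} (v : Int)
    (hk : 0 ≤ k) (hkK : k < K + 1) (hi : 0 ≤ i) (hin : i < (n : Int)) (hj : 0 ≤ j) (_hjn : j < (n : Int)) :
    Shape K n (aSet3 f k i j v) := by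
  obtain ⟨hlen, hmem⟩ := hs
  have hkf : k.toNat < f.length := by omega
  have hgl : f.getD k.toNat [] = f[k.toNat] := List.getD_eq_getElem f [] hkf
  have hlay := hmem (f[k.toNat]) (List.getElem_mem hkf)
  have hif : i.toNat < f[k.toNat].length := by omega
  have hgr : f[k.toNat].getD i.toNat [] = f[k.toNat][i.toNat] := List.getD_eq_getElem _ [] hif
  have hrow := hlay.2 _ (List.getElem_mem hif)
  rw [aSet3_toNat v hk hi hj]
  refine ⟨by simpa using hlen, ?_⟩
  intro l hl
  rcases List.mem_or_eq_of_mem_set hl with hl | rfl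
  · exact hmem l hl
  · rw [hgl, hgr]
    refine ⟨by simpa using hlay.1, ?_⟩
    intro r hr
    rcases List.mem_or_eq_of_mem_set hr with hr | rfl
    · exact hlay.2 r hr
    · simpa using hrow

theorem aGet3_aSet3 {K : Int} {n : Nat} {f : List (List (List Int))} (hs : Shape K n f)
    {k i j k' i' j' : Int} (v : Int)
    (hk : 0 ≤ k) (hkK : k < K + 1) (hi : 0 ≤ i) (hin : i < (n : Int)) (hj : 0 ≤ j) (hjn : j < (n : Int))
    (hk' : 0 ≤ k') (hi' : 0 ≤ i') (hj' : 0 ≤ j') :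
    aGet3 (aSet3 f k i j v) k' i' j' = if k' = k ∧ i' = i ∧ j' = j then v else aGet3 f k' i' j' := by
  obtain ⟨hlen, hmem⟩ := hs
  have hkf : k.toNat < f.length := by omega
  have hlay := hmem (f[k.toNat]) (List.getElem_mem hkf)
  have hgl : f.getD k.toNat [] = f[k.toNat] := List.getD_eq_getElem f [] hkf
  have hif : i.toNat < f[k.toNat].length := by omega
  have hgr : f[k.toNat].getD i.toNat [] = f[k.toNat][i.toNat] := List.getD_eq_getElem _ [] hif
  have hrow := hlay.2 _ (List.getElem_mem hif)
  have hjf : j.toNat < f[k.toNat][i.toNat].length := by omega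
  rw [aSet3_toNat v hk hi hj, aGet3_toNat hk' hi' hj', aGet3_toNat hk' hi' hj']
  rw [getD_set_same]
  by_cases h1 : k'.toNat = k.toNat ∧ k.toNat < f.length
  · rw [if_pos h1]
    rw [getD_set_same]
    by_cases h2 : i'.toNat = i.toNat ∧ i.toNat < (f.getD k.toNat []).length
    · rw [if_pos h2, getD_set_same]
      by_cases h3 : j'.toNat = j.toNat ∧ j.toNat < ((f.getD k.toNat []).getD i.toNat []).length
      · rw [if_pos h3, if_pos (by omega)]
      · rw [if_neg h3, if_neg (by rw [hgl, hgr] at h3; omega)]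
        rw [h1.1, h2.1]
    · rw [if_neg h2, if_neg (by rw [hgl] at h2; omega)]
      rw [h1.1]
  · rw [if_neg h1, if_neg (by omega)]

def TOK (vals : List Int) (K k i m : Int) (f : List (List (List Int))) : Prop :=
  ∀ k' i' j' : Int, 0 ≤ k' → k' ≤ K → 0 ≤ i' → i' < (vals.length : Int) → 0 ≤ j' →
    j' < (vals.length : Int) →
    aGet3 f k' i' j' = if k' < k ∨ (k' = k ∧ (i < i' ∨ (i' = i ∧ j' < m)))
      then gSpec vals k' i' j' else 0

theorem jloop (vals : List Int) (K k i : Int) (hk : 0 ≤ k) (hkK : k ≤ K)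
    (hi : 0 ≤ i) (hin : i < (vals.length : Int))
    (hsp : ∀ a ∈ vals, ∀ b ∈ vals, |a - b| ≤ 26) :
    ∀ (N : Nat) (m : Int) (f : List (List (List Int))), i < m → m ≤ (vals.length : Int) →
    ((vals.length : Int) - m).toNat ≤ N → Shape K vals.length f → TOK vals K k i m f →
    Shape K vals.length ((PySem.List.pyRange m (vals.length : Int) 1).foldl (fun f j =>
      let res := max (aGet3 f k (i + 1) j) (aGet3 f k i (j - 1))
      let d := |PySem.List.pyGetD vals i 0 - PySem.List.pyGetD vals j 0|
      let op := min d (26 - d)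
      let res := if op ≤ k then max res (aGet3 f (k - op) (i + 1) (j - 1) + 2) else res
      aSet3 f k i j res) f) ∧
    TOK vals K k i (vals.length : Int) ((PySem.List.pyRange m (vals.length : Int) 1).foldl (fun f j =>
      let res := max (aGet3 f k (i + 1) j) (aGet3 f k i (j - 1))
      let d := |PySem.List.pyGetD vals i 0 - PySem.List.pyGetD vals j 0|
      let op := min d (26 - d)
      let res := if op ≤ k then max res (aGet3 f (k - op) (i + 1) (j - 1) + 2) else res
      aSet3 f k i j res) f) := by
  intro N
  induction N with
  | zero =>
    intro m f him hmn hN hS hT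
    have hm : m = (vals.length : Int) := by omega
    rw [hm, PySem.List.pyRange_one_eq_nil (by omega)]
    exact ⟨hS, hm ▸ hT⟩
  | succ N ih =>
    intro m f him hmn hN hS hT
    by_cases hmn2 : m < (vals.length : Int)
    · rw [PySem.List.pyRange_one_cons hmn2, List.foldl_cons]
      -- the value written at (k, i, m)
      have hA : aGet3 f k (i + 1) m = gSpec vals k (i + 1) m := by
        rw [hT k (i + 1) m hk hkK (by omega) (by omega) (by omega) (by omega), if_pos (by omega)]
      have hB : aGet3 f k i (m - 1) = gSpec vals k i (m - 1) := by
        rw [hT k i (m - 1) hk hkK hi hin (by omega) (by omega), if_pos (by omega)]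
      have hd : |PySem.List.pyGetD vals i 0 - PySem.List.pyGetD vals m 0| ≤ 26 := by
        rw [PySem.List.pyGetD_eq_getElem vals 0 hi hin, PySem.List.pyGetD_eq_getElem vals 0 (by omega) hmn2]
        exact hsp _ (List.getElem_mem _) _ (List.getElem_mem _)
      have hd0 : 0 ≤ |PySem.List.pyGetD vals i 0 - PySem.List.pyGetD vals m 0| := abs_nonneg _
      have hres : (if min |PySem.List.pyGetD vals i 0 - PySem.List.pyGetD vals m 0|
            (26 - |PySem.List.pyGetD vals i 0 - PySem.List.pyGetD vals m 0|) ≤ k then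
          max (max (aGet3 f k (i + 1) m) (aGet3 f k i (m - 1)))
            (aGet3 f (k - min |PySem.List.pyGetD vals i 0 - PySem.List.pyGetD vals m 0|
              (26 - |PySem.List.pyGetD vals i 0 - PySem.List.pyGetD vals m 0|)) (i + 1) (m - 1) + 2)
          else max (aGet3 f k (i + 1) m) (aGet3 f k i (m - 1))) = gSpec vals k i m := by
        rw [gSpec_of_gt him]
        by_cases hop : min |PySem.List.pyGetD vals i 0 - PySem.List.pyGetD vals m 0|
            (26 - |PySem.List.pyGetD vals i 0 - PySem.List.pyGetD vals m 0|) ≤ k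
        · rw [if_pos hop, if_pos hop, hA, hB]
          have hC : aGet3 f (k - min |PySem.List.pyGetD vals i 0 - PySem.List.pyGetD vals m 0|
              (26 - |PySem.List.pyGetD vals i 0 - PySem.List.pyGetD vals m 0|)) (i + 1) (m - 1)
              = gSpec vals (k - min |PySem.List.pyGetD vals i 0 - PySem.List.pyGetD vals m 0|
              (26 - |PySem.List.pyGetD vals i 0 - PySem.List.pyGetD vals m 0|)) (i + 1) (m - 1) := by
            rw [hT _ (i + 1) (m - 1) (by omega) (by omega) (by omega) (by omega) (by omega)
              (by omega), if_pos (by omega)]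
          rw [hC]
        · rw [if_neg hop, if_neg hop, hA, hB]
      have hS1 : Shape K vals.length (aSet3 f k i m
          (if min |PySem.List.pyGetD vals i 0 - PySem.List.pyGetD vals m 0|
            (26 - |PySem.List.pyGetD vals i 0 - PySem.List.pyGetD vals m 0|) ≤ k then
          max (max (aGet3 f k (i + 1) m) (aGet3 f k i (m - 1)))
            (aGet3 f (k - min |PySem.List.pyGetD vals i 0 - PySem.List.pyGetD vals m 0|
              (26 - |PySem.List.pyGetD vals i 0 - PySem.List.pyGetD vals m 0|)) (i + 1) (m - 1) + 2)
          else max (aGet3 f k (i + 1) m) (aGet3 f k i (m - 1)))) :=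
        Shape_aSet3 hS _ hk (by omega) hi hin (by omega) (by omega)
      have hT1 : TOK vals K k i (m + 1) (aSet3 f k i m
          (if min |PySem.List.pyGetD vals i 0 - PySem.List.pyGetD vals m 0|
            (26 - |PySem.List.pyGetD vals i 0 - PySem.List.pyGetD vals m 0|) ≤ k then
          max (max (aGet3 f k (i + 1) m) (aGet3 f k i (m - 1)))
            (aGet3 f (k - min |PySem.List.pyGetD vals i 0 - PySem.List.pyGetD vals m 0|
              (26 - |PySem.List.pyGetD vals i 0 - PySem.List.pyGetD vals m 0|)) (i + 1) (m - 1) + 2)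
          else max (aGet3 f k (i + 1) m) (aGet3 f k i (m - 1)))) := by
        intro k' i' j' h1 h2 h3 h4 h5 h6
        rw [aGet3_aSet3 hS _ hk (by omega) hi hin (by omega) (by omega) h1 h3 h5]
        by_cases heq : k' = k ∧ i' = i ∧ j' = m
        · rw [if_pos heq, hres, if_pos (by omega), heq.1, heq.2.1, heq.2.2]
        · rw [if_neg heq, hT k' i' j' h1 h2 h3 h4 h5 h6]
          have : (k' < k ∨ (k' = k ∧ (i < i' ∨ (i' = i ∧ j' < m + 1)))) ↔
              (k' < k ∨ (k' = k ∧ (i < i' ∨ (i' = i ∧ j' < m)))) := by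
            constructor <;> intro h <;> omega
          simp only [this]
      exact ih (m + 1) _ (by omega) (by omega) (by omega) hS1 hT1
    · have hm : m = (vals.length : Int) := by omega
      rw [hm, PySem.List.pyRange_one_eq_nil (by omega)]
      exact ⟨hS, hm ▸ hT⟩

theorem iloop (vals : List Int) (K k : Int) (hk : 0 ≤ k) (hkK : k ≤ K)
    (hsp : ∀ a ∈ vals, ∀ b ∈ vals, |a - b| ≤ 26) :
    ∀ (N : Nat) (i0 : Int) (f : List (List (List Int))), -1 ≤ i0 → i0 < (vals.length : Int) →
    (i0 + 1).toNat ≤ N → Shape K vals.length f → TOK vals K k i0 0 f →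
    Shape K vals.length ((PySem.List.pyRange i0 (-1) (-1)).foldl (fun f i =>
      let f := aSet3 f k i i 1
      (PySem.List.pyRange (i + 1) (vals.length : Int) 1).foldl (fun f j =>
        let res := max (aGet3 f k (i + 1) j) (aGet3 f k i (j - 1))
        let d := |PySem.List.pyGetD vals i 0 - PySem.List.pyGetD vals j 0|
        let op := min d (26 - d)
        let res := if op ≤ k then max res (aGet3 f (k - op) (i + 1) (j - 1) + 2) else res
        aSet3 f k i j res) f) f) ∧
    TOK vals K k (-1) 0 ((PySem.List.pyRange i0 (-1) (-1)).foldl (fun f i =>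
      let f := aSet3 f k i i 1
      (PySem.List.pyRange (i + 1) (vals.length : Int) 1).foldl (fun f j =>
        let res := max (aGet3 f k (i + 1) j) (aGet3 f k i (j - 1))
        let d := |PySem.List.pyGetD vals i 0 - PySem.List.pyGetD vals j 0|
        let op := min d (26 - d)
        let res := if op ≤ k then max res (aGet3 f (k - op) (i + 1) (j - 1) + 2) else res
        aSet3 f k i j res) f) f) := by
  intro N
  induction N with
  | zero =>
    intro i0 f h1 h2 hN hS hT
    have hi0 : i0 = -1 := by omega
    rw [hi0, PySem.List.pyRange_neg_one_eq_nil (by omega)]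
    exact ⟨hS, hi0 ▸ hT⟩
  | succ N ih =>
    intro i0 f h1 h2 hN hS hT
    by_cases hi0 : 0 ≤ i0
    · rw [PySem.List.pyRange_neg_one_cons (by omega), List.foldl_cons]
      have hS1 : Shape K vals.length (aSet3 f k i0 i0 1) :=
        Shape_aSet3 hS 1 hk (by omega) hi0 h2 hi0 h2
      have hT1 : TOK vals K k i0 (i0 + 1) (aSet3 f k i0 i0 1) := by
        intro k' i' j' hb1 hb2 hb3 hb4 hb5 hb6
        rw [aGet3_aSet3 hS 1 hk (by omega) hi0 h2 hi0 h2 hb1 hb3 hb5]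
        by_cases heq : k' = k ∧ i' = i0 ∧ j' = i0
        · rw [if_pos heq, if_pos (by omega), heq.1, heq.2.1, heq.2.2,
            gSpec_of_eq rfl]
        · rw [if_neg heq, hT k' i' j' hb1 hb2 hb3 hb4 hb5 hb6]
          by_cases hr : k' < k ∨ (k' = k ∧ (i0 < i' ∨ (i' = i0 ∧ j' < i0 + 1)))
          · rw [if_pos hr]
            by_cases hr0 : k' < k ∨ (k' = k ∧ (i0 < i' ∨ (i' = i0 ∧ j' < 0)))
            · rw [if_pos hr0]
            · rw [if_neg hr0, gSpec_of_lt (by omega)]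
          · rw [if_neg hr, if_neg (by omega)]
      obtain ⟨hS2, hT2⟩ := jloop vals K k i0 hk hkK hi0 h2 hsp vals.length (i0 + 1)
        (aSet3 f k i0 i0 1) (by omega) (by omega) (by omega) hS1 hT1
      have hT3 : TOK vals K k (i0 - 1) 0 ((PySem.List.pyRange (i0 + 1) (vals.length : Int) 1).foldl
          (fun f j =>
            let res := max (aGet3 f k (i0 + 1) j) (aGet3 f k i0 (j - 1))
            let d := |PySem.List.pyGetD vals i0 0 - PySem.List.pyGetD vals j 0|
            let op := min d (26 - d)
            let res := if op ≤ k then max res (aGet3 f (k - op) (i0 + 1) (j - 1) + 2) else res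
            aSet3 f k i0 j res) (aSet3 f k i0 i0 1)) := by
        intro k' i' j' hb1 hb2 hb3 hb4 hb5 hb6
        rw [hT2 k' i' j' hb1 hb2 hb3 hb4 hb5 hb6]
        have hiff : (k' < k ∨ (k' = k ∧ (i0 < i' ∨ (i' = i0 ∧ j' < (vals.length : Int))))) ↔
            (k' < k ∨ (k' = k ∧ (i0 - 1 < i' ∨ (i' = i0 - 1 ∧ j' < 0)))) := by
          constructor <;> intro h <;> omega
        simp only [hiff]
      exact ih (i0 - 1) _ (by omega) (by omega) (by omega) hS2 hT3
    · have hi0' : i0 = -1 := by omega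
      rw [hi0', PySem.List.pyRange_neg_one_eq_nil (by omega)]
      exact ⟨hS, hi0' ▸ hT⟩

theorem kloop (vals : List Int) (K : Int) (_hK : 0 ≤ K)
    (hsp : ∀ a ∈ vals, ∀ b ∈ vals, |a - b| ≤ 26) :
    ∀ (N : Nat) (k0 : Int) (f : List (List (List Int))), 0 ≤ k0 → k0 ≤ K + 1 →
    (K + 1 - k0).toNat ≤ N → Shape K vals.length f →
    TOK vals K k0 ((vals.length : Int) - 1) 0 f →
    Shape K vals.length ((PySem.List.pyRange k0 (K + 1) 1).foldl (fun f k =>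
      (PySem.List.pyRange ((vals.length : Int) - 1) (-1) (-1)).foldl (fun f i =>
        let f := aSet3 f k i i 1
        (PySem.List.pyRange (i + 1) (vals.length : Int) 1).foldl (fun f j =>
          let res := max (aGet3 f k (i + 1) j) (aGet3 f k i (j - 1))
          let d := |PySem.List.pyGetD vals i 0 - PySem.List.pyGetD vals j 0|
          let op := min d (26 - d)
          let res := if op ≤ k then max res (aGet3 f (k - op) (i + 1) (j - 1) + 2) else res
          aSet3 f k i j res) f) f) f) ∧
    TOK vals K (K + 1) ((vals.length : Int) - 1) 0 ((PySem.List.pyRange k0 (K + 1) 1).foldl (fun f k =>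
      (PySem.List.pyRange ((vals.length : Int) - 1) (-1) (-1)).foldl (fun f i =>
        let f := aSet3 f k i i 1
        (PySem.List.pyRange (i + 1) (vals.length : Int) 1).foldl (fun f j =>
          let res := max (aGet3 f k (i + 1) j) (aGet3 f k i (j - 1))
          let d := |PySem.List.pyGetD vals i 0 - PySem.List.pyGetD vals j 0|
          let op := min d (26 - d)
          let res := if op ≤ k then max res (aGet3 f (k - op) (i + 1) (j - 1) + 2) else res
          aSet3 f k i j res) f) f) f) := by
  intro N
  induction N with
  | zero =>
    intro k0 f h1 h2 hN hS hT
    have hk0 : k0 = K + 1 := by omega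
    rw [hk0, PySem.List.pyRange_one_eq_nil (by omega)]
    exact ⟨hS, hk0 ▸ hT⟩
  | succ N ih =>
    intro k0 f h1 h2 hN hS hT
    by_cases hk0 : k0 < K + 1
    · rw [PySem.List.pyRange_one_cons hk0, List.foldl_cons]
      obtain ⟨hS2, hT2⟩ := iloop vals K k0 h1 (by omega) hsp vals.length
        ((vals.length : Int) - 1) f (by omega) (by omega) (by omega) hS hT
      have hT3 : TOK vals K (k0 + 1) ((vals.length : Int) - 1) 0
          ((PySem.List.pyRange ((vals.length : Int) - 1) (-1) (-1)).foldl (fun f i =>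
            let f := aSet3 f k0 i i 1
            (PySem.List.pyRange (i + 1) (vals.length : Int) 1).foldl (fun f j =>
              let res := max (aGet3 f k0 (i + 1) j) (aGet3 f k0 i (j - 1))
              let d := |PySem.List.pyGetD vals i 0 - PySem.List.pyGetD vals j 0|
              let op := min d (26 - d)
              let res := if op ≤ k0 then max res (aGet3 f (k0 - op) (i + 1) (j - 1) + 2) else res
              aSet3 f k0 i j res) f) f) := by
        intro k' i' j' hb1 hb2 hb3 hb4 hb5 hb6
        rw [hT2 k' i' j' hb1 hb2 hb3 hb4 hb5 hb6]
        have hiff : (k' < k0 ∨ (k' = k0 ∧ (-1 < i' ∨ (i' = -1 ∧ j' < 0)))) ↔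
            (k' < k0 + 1 ∨ (k' = k0 + 1 ∧ ((vals.length : Int) - 1 < i' ∨
              (i' = (vals.length : Int) - 1 ∧ j' < 0)))) := by
          constructor <;> intro h <;> omega
        simp only [hiff]
      exact ih (k0 + 1) _ (by omega) (by omega) (by omega) hS2 hT3
    · have hk0' : k0 = K + 1 := by omega
      rw [hk0', PySem.List.pyRange_one_eq_nil (by omega)]
      exact ⟨hS, hk0' ▸ hT⟩

theorem init_shape (vals : List Int) (K : Int) :
    Shape K vals.length ((PySem.List.pyRange 0 (K + 1) 1).map (fun _ =>
      (PySem.List.pyRange 0 (vals.length : Int) 1).map (fun _ =>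
        PySem.List.pyRepeat [(0 : Int)] (vals.length : Int)))) := by
  constructor
  · simp [PySem.List.length_pyRange_one]
  · intro l hl
    obtain ⟨x, _, rfl⟩ := List.mem_map.mp hl
    constructor
    · simp [PySem.List.length_pyRange_one]
    · intro r hr
      obtain ⟨y, _, rfl⟩ := List.mem_map.mp hr
      rw [PySem.List.pyRepeat_singleton]
      simp

theorem init_TOK (vals : List Int) (K : Int) :
    TOK vals K 0 ((vals.length : Int) - 1) 0 ((PySem.List.pyRange 0 (K + 1) 1).map (fun _ =>
      (PySem.List.pyRange 0 (vals.length : Int) 1).map (fun _ =>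
        PySem.List.pyRepeat [(0 : Int)] (vals.length : Int)))) := by
  intro k' i' j' h1 h2 h3 h4 h5 h6
  rw [if_neg (by omega), aGet3_toNat h1 h3 h5]
  have hk' : k'.toNat < ((PySem.List.pyRange 0 (K + 1) 1).map (fun _ =>
      (PySem.List.pyRange 0 (vals.length : Int) 1).map (fun _ =>
        PySem.List.pyRepeat [(0 : Int)] (vals.length : Int)))).length := by
    simp [PySem.List.length_pyRange_one]; omega
  rw [List.getD_eq_getElem _ _ hk', List.getElem_map]
  have hi' : i'.toNat < ((PySem.List.pyRange 0 (vals.length : Int) 1).map (fun _ =>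
      PySem.List.pyRepeat [(0 : Int)] (vals.length : Int))).length := by
    simp [PySem.List.length_pyRange_one]; omega
  rw [List.getD_eq_getElem _ _ hi', List.getElem_map, PySem.List.pyRepeat_singleton]
  have hj' : j'.toNat < (List.replicate ((vals.length : Int)).toNat (0 : Int)).length := by
    simp; omega
  rw [List.getD_eq_getElem _ _ hj', List.getElem_replicate]

theorem tableA (vals : List Int) (K : Int) (hK : 0 ≤ K)
    (hsp : ∀ a ∈ vals, ∀ b ∈ vals, |a - b| ≤ 26) (hn : 1 ≤ vals.length) :
    PySem.List.pyGetD (PySem.List.pyGetD (PySem.List.pyGetD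
      ((PySem.List.pyRange 0 (K + 1) 1).foldl (fun f k =>
        (PySem.List.pyRange ((vals.length : Int) - 1) (-1) (-1)).foldl (fun f i =>
          let f := aSet3 f k i i 1
          (PySem.List.pyRange (i + 1) (vals.length : Int) 1).foldl (fun f j =>
            let res := max (aGet3 f k (i + 1) j) (aGet3 f k i (j - 1))
            let d := |PySem.List.pyGetD vals i 0 - PySem.List.pyGetD vals j 0|
            let op := min d (26 - d)
            let res := if op ≤ k then max res (aGet3 f (k - op) (i + 1) (j - 1) + 2) else res
            aSet3 f k i j res) f) f)
        ((PySem.List.pyRange 0 (K + 1) 1).map (fun _ =>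
          (PySem.List.pyRange 0 (vals.length : Int) 1).map (fun _ =>
            PySem.List.pyRepeat [(0 : Int)] (vals.length : Int))))) K []) 0 []) (-1) 0
    = gSpec vals K 0 ((vals.length : Int) - 1) := by
  obtain ⟨hSF, hTF⟩ := kloop vals K hK hsp (K + 1).toNat 0 _ (by omega) (by omega) (by omega)
    (init_shape vals K) (init_TOK vals K)
  set F := (PySem.List.pyRange 0 (K + 1) 1).foldl _ _ with hF
  have hcell : aGet3 F K 0 ((vals.length : Int) - 1) = gSpec vals K 0 ((vals.length : Int) - 1) := by
    rw [hTF K 0 ((vals.length : Int) - 1) hK le_rfl le_rfl (by omega) (by omega) (by omega),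
      if_pos (by omega)]
  obtain ⟨hlen, hmem⟩ := hSF
  have hKf : K.toNat < F.length := by omega
  have hlay := hmem (F[K.toNat]) (List.getElem_mem hKf)
  have h0f : 0 < F[K.toNat].length := by omega
  have hrow := hlay.2 _ (List.getElem_mem h0f)
  rw [aGet3_toNat hK le_rfl (by omega)] at hcell
  simp only [Int.toNat_zero] at hcell
  rw [pyGetD_nonneg F hK, pyGetD_nonneg _ (by omega : (0:Int) ≤ 0)]
  simp only [Int.toNat_zero]
  rw [List.getD_eq_getElem _ _ hKf] at hcell ⊢
  have h0' : 0 < F[K.toNat].length := by omega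
  rw [List.getD_eq_getElem _ _ h0'] at hcell ⊢
  have hne : F[K.toNat][0] ≠ [] := by
    intro h
    rw [h] at hrow
    simp at hrow
    omega
  rw [PySem.List.pyGetD_neg_one _ 0 hne]
  rw [List.getLast_eq_getElem]
  rw [List.getD_eq_getElem _ _ (by omega : (((vals.length : Int) - 1)).toNat <
    F[K.toNat][0].length)] at hcell
  rw [← hcell]
  congr 1
  omega

def MemoOK (vals : List Int) (memo : PySem.Dict (Int × Int × Int) Int) : Prop :=
  ∀ k i j v, memo.get? (k, i, j) = some v → v = gSpec vals k i j


theorem recB_correct (vals : List Int) (gas : Nat) : ∀ (k i j : Int)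
    (memo : PySem.Dict (Int × Int × Int) Int), (j - i).toNat ≤ gas → MemoOK vals memo →
    (recB vals gas k i j memo).1 = gSpec vals k i j ∧ MemoOK vals (recB vals gas k i j memo).2 := by
  induction gas with
  | zero =>
    intro k i j memo hg hm
    rw [recB]
    by_cases h1 : j < i
    · refine ⟨?_, by simp [h1, hm]⟩
      rw [gSpec]; simp [h1]
    · by_cases h2 : i = j
      · refine ⟨?_, by simp [h2, hm]⟩
        rw [gSpec]; simp [h2]
      · omega
  | succ gas ih =>
    intro k i j memo hg hm
    rw [recB]
    by_cases h1 : j < i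
    · refine ⟨?_, by simp [h1, hm]⟩
      rw [gSpec]; simp [h1]
    · by_cases h2 : i = j
      · refine ⟨?_, by simp [h2, hm]⟩
        rw [gSpec]; simp [h2]
      · simp only [if_neg h1, if_neg h2]
        cases hmem : memo.get? (k, i, j) with
        | some v =>
          simp only []
          exact ⟨hm k i j v hmem, hm⟩
        | none =>
          simp only []
          obtain ⟨e1, m1⟩ := ih k (i + 1) j memo (by omega) hm
          obtain ⟨e2, m2⟩ := ih k i (j - 1) _ (by omega) m1
          have hg' : gSpec vals k i j =
              (if min |PySem.List.pyGetD vals i 0 - PySem.List.pyGetD vals j 0|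
                  (26 - |PySem.List.pyGetD vals i 0 - PySem.List.pyGetD vals j 0|) ≤ k then
                max (max (gSpec vals k (i + 1) j) (gSpec vals k i (j - 1)))
                  (gSpec vals (k - min |PySem.List.pyGetD vals i 0 - PySem.List.pyGetD vals j 0|
                    (26 - |PySem.List.pyGetD vals i 0 - PySem.List.pyGetD vals j 0|)) (i + 1) (j - 1) + 2)
              else max (gSpec vals k (i + 1) j) (gSpec vals k i (j - 1))) := by
            conv_lhs => rw [gSpec]
            simp only [if_neg h1, if_neg h2]
          by_cases hop : min |PySem.List.pyGetD vals i 0 - PySem.List.pyGetD vals j 0|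
              (26 - |PySem.List.pyGetD vals i 0 - PySem.List.pyGetD vals j 0|) ≤ k
          · obtain ⟨e3, m3⟩ := ih (k - min |PySem.List.pyGetD vals i 0 - PySem.List.pyGetD vals j 0|
              (26 - |PySem.List.pyGetD vals i 0 - PySem.List.pyGetD vals j 0|)) (i + 1) (j - 1) _ (by omega) m2
            simp only [if_pos hop]
            have hval : max (max (recB vals gas k (i + 1) j memo).1
                (recB vals gas k i (j - 1) (recB vals gas k (i + 1) j memo).2).1)
                ((recB vals gas (k - min |PySem.List.pyGetD vals i 0 - PySem.List.pyGetD vals j 0|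
                  (26 - |PySem.List.pyGetD vals i 0 - PySem.List.pyGetD vals j 0|)) (i + 1) (j - 1)
                  (recB vals gas k i (j - 1) (recB vals gas k (i + 1) j memo).2).2).1 + 2)
                = gSpec vals k i j := by
              rw [e1, e2, e3, hg', if_pos hop]
            refine ⟨hval, ?_⟩
            intro k' i' j' v hv
            rw [PySem.Dict.get?_insert] at hv
            split at hv
            · rename_i hkey
              obtain ⟨hk', hi', hj'⟩ : k' = k ∧ i' = i ∧ j' = j := by
                simpa using hkey
              subst hk'; subst hi'; subst hj'
              cases hv
              exact hval
            · exact m3 k' i' j' v hv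
          · simp only [if_neg hop]
            have hval : max (recB vals gas k (i + 1) j memo).1
                (recB vals gas k i (j - 1) (recB vals gas k (i + 1) j memo).2).1
                = gSpec vals k i j := by
              rw [e1, e2, hg', if_neg hop]
            refine ⟨hval, ?_⟩
            intro k' i' j' v hv
            rw [PySem.Dict.get?_insert] at hv
            split at hv
            · rename_i hkey
              obtain ⟨hk', hi', hj'⟩ : k' = k ∧ i' = i ∧ j' = j := by
                simpa using hkey
              subst hk'; subst hi'; subst hj'
              cases hv
              exact hval
            · exact m2 k' i' j' v hv

theorem cntFold_eq (v : List Int) :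
    (PySem.List.pyRange 0 (PySem.Int.floordiv ((v.length : Int)) 2) 1).foldl
      (fun cnt i =>
        let d := |PySem.List.pyGetD v i 0 - PySem.List.pyGetD v (-1 - i) 0|
        cnt + min d (26 - d)) 0
    = (((v.take (v.length / 2)).zip v.reverse).map
        (fun p => min |p.1 - p.2| (26 - |p.1 - p.2|))).sum := by
  have hlam : (fun (cnt i : Int) =>
      let d := |PySem.List.pyGetD v i 0 - PySem.List.pyGetD v (-1 - i) 0|
      cnt + min d (26 - d)) = (fun (c i : Int) =>
      c + min |PySem.List.pyGetD v i 0 - PySem.List.pyGetD v (-1 - i) 0|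
        (26 - |PySem.List.pyGetD v i 0 - PySem.List.pyGetD v (-1 - i) 0|)) := rfl
  rw [hlam, PySem.List.foldl_add]
  rw [zero_add]
  congr 1
  have hdiv : PySem.Int.floordiv ((v.length : Int)) 2 = ((v.length / 2 : Nat) : Int) := by
    rw [PySem.Int.floordiv_eq_ediv_of_pos (by omega)]
    exact_mod_cast (Int.natCast_ediv v.length 2).symm
  rw [hdiv, PySem.List.pyRange_zero_nat]
  rw [List.map_map]
  apply List.ext_getElem
  · simp [List.length_zip]
    omega
  · intro idx h1 h2
    simp only [List.getElem_map, List.getElem_range, Function.comp_apply, List.getElem_zip,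
      List.getElem_take, List.getElem_reverse]
    have hidx : idx < v.length / 2 := by simpa using h1
    have hlt : idx < v.length := by omega
    have hg1 : PySem.List.pyGetD v (idx : Int) 0 = v[idx] := by
      rw [PySem.List.pyGetD_natCast, List.getD_eq_getElem _ _ hlt]
    have hneg : (-1 - (idx : Int)) = -((idx + 1 : Nat) : Int) := by push_cast; ring
    have hg2 : PySem.List.pyGetD v (-1 - (idx : Int)) 0 = v[v.length - 1 - idx] := by
      rw [hneg, PySem.List.pyGetD_neg_natCast v (idx + 1) 0 (by omega) (by omega)]
      congr 1
      omega
    rw [hg1, hg2]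

theorem MemoOK_empty (vals : List Int) : MemoOK vals PySem.Dict.empty := by
  intro k i j v hv
  simp [PySem.Dict.get?_empty] at hv

theorem main_eq (s : String) (K : Int) (hpre : Pre_solve s K) : solve s K = solve_alt s K := by
  unfold solve solve_alt
  simp only [PySem.List.len_eq]
  set vals := s.toList.map (fun c => (c.toNat : Int)) with hvals
  split_ifs with hcnt
  · rfl
  · have hcv : (PySem.List.pyRange 0 (PySem.Int.floordiv (vals.length : Int) 2) 1).foldl
        (fun cnt i =>
          let d := |PySem.List.pyGetD vals i 0 - PySem.List.pyGetD vals (-1 - i) 0|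
          cnt + min d (26 - d)) 0 = pvCnt s := by
      rw [cntFold_eq vals]
      rfl
    rcases hpre with h | ⟨hK, hall⟩
    · rw [hcv] at hcnt
      exact absurd h hcnt
    · have hsp : ∀ a ∈ vals, ∀ b ∈ vals, |a - b| ≤ 26 := by
        intro a ha b hb
        obtain ⟨c, hc, rfl⟩ := List.mem_map.mp ha
        obtain ⟨c', hc', rfl⟩ := List.mem_map.mp hb
        rw [List.all_eq_true] at hall
        have h1 := hall c hc
        rw [List.all_eq_true] at h1
        have h1' := h1 c' hc'
        have h2 := hall c' hc'
        rw [List.all_eq_true] at h2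
        have h2' := h2 c hc
        simp only [decide_eq_true_eq] at h1' h2'
        rw [abs_le]
        constructor <;> omega
      have hn : 1 ≤ vals.length := by
        by_contra hn
        have h0 : vals = [] := by
          cases h' : vals with
          | nil => rfl
          | cons x t => rw [h'] at hn; simp at hn
        rw [hcv] at hcnt
        have : pvCnt s = (((vals.take (vals.length / 2)).zip vals.reverse).map
            (fun p => min |p.1 - p.2| (26 - |p.1 - p.2|))).sum := rfl
        rw [h0] at this
        simp at this
        omega
      rw [tableA vals K hK hsp hn]
      exact ((recB_correct vals ((vals.length : Int) - 1).toNat K 0 ((vals.length : Int) - 1)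
        PySem.Dict.empty (by omega) (MemoOK_empty vals)).1).symm

-- ===== VERDICT (by name: the statement is the Claim_ definition above) =====
theorem solve_spec : Claim_equal_solve := by
  intro s K _ hpre
  unfold Spec_solve
  exact main_eq s K hpre
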